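-- pv_equiv track=rewrite | github.com/TomLatin/my_leetcode_solutions | 66_plus_one.py | iteration_plus_one
-- ===== SOURCE A (Python) =====
-- from typing import List
--
-- def iteration_plus_one(digits: List[int]) -> List[int]:
--     one = 1
--     i = 0
--     digits = digits[::-1]
--
--     while one:
--         if i < len(digits):
--             if digits[i] == 9:
--                 digits[i] = 0
--             else:
--                 digits[i] += 1
--                 one = 0
--         else:
--             digits.append(one)
--             one = 0
--         i += 1
--     return digits[::-1]
-- ===== SOURCE B (Python) =====
-- from typing import List
--
-- def iteration_plus_one(digits: List[int]) -> List[int]: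
--     res = list(digits)
--     for i in range(len(res) - 1, -1, -1):
--         if res[i] != 9:
--             res[i] += 1
--             for j in range(i + 1, len(res)):
--                 res[j] = 0
--             return res
--     return [1] + [0] * len(digits)
-- ===== Notes on version B (the rewrite author's own statement) =====
-- stated objective: simpler
-- what changed: Replaces the reverse-copy ripple-carry while-loop (and its re-reversal) with a single right-to-left scan for the rightmost non-9 digit, incrementing it and zero-filling the suffix, with a one-followed-by-zeros result when every digit is 9.
import Mathlib
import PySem

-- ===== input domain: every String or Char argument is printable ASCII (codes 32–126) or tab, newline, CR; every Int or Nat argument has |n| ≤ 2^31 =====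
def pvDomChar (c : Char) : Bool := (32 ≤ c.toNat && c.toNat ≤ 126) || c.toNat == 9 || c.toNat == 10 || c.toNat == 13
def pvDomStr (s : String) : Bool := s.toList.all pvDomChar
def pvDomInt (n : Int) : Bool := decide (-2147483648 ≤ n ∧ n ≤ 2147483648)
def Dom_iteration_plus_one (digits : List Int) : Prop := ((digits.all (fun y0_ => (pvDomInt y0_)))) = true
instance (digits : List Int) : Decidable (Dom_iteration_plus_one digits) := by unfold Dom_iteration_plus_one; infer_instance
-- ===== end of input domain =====

-- B replaces A's reverse-copy ripple-carry loop with a rightmost-non-9 pivot search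
-- plus zero-fill of the suffix (objective: simpler). Neither version mutates its argument.


-- ===== PORT A =====
-- A's while-loop over the reversed copy, as structural recursion over that reversed
-- list: digit 9 becomes 0 and the carry continues; a non-9 digit gets +1 and the
-- loop stops (one = 0, rest untouched); past the end, 1 is appended.
def pvLoopA : List Int → List Int
  | [] => [1]
  | d :: rest => if d = 9 then 0 :: pvLoopA rest else (d + 1) :: rest

def iteration_plus_one (digits : List Int) : List Int :=
  (pvLoopA digits.reverse).reverse

-- ===== PORT B =====
-- B's backwards index scan as recursion that inspects the suffix (the later indices)
-- first: if the suffix contains the pivot, keep d; else if d ≠ 9, d is the rightmost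
-- non-9: increment it and zero-fill everything after; none means "all 9s so far".
def pvFindB : List Int → Option (List Int)
  | [] => none
  | d :: rest =>
    match pvFindB rest with
    | some r => some (d :: r)
    | none => if d ≠ 9 then some ((d + 1) :: rest.map (fun _ => 0)) else none

def iteration_plus_one_alt (digits : List Int) : List Int :=
  (pvFindB digits).getD (1 :: digits.map (fun _ => 0))

-- ===== PRECONDITION & SPEC =====
def Spec_iteration_plus_one (digits : List Int) (out : List Int) : Prop := out = iteration_plus_one_alt digits
instance (digits : List Int) (out : List Int) : Decidable (Spec_iteration_plus_one digits out) := by unfold Spec_iteration_plus_one; infer_instance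

-- ===== CLAIM (what is proved, stated in full; the proofs are below) =====
def Claim_equal_iteration_plus_one : Prop := ∀ (digits : List Int), Dom_iteration_plus_one digits → Spec_iteration_plus_one digits (iteration_plus_one digits)

-- ===== LEMMAS AND PROOFS =====

theorem pvFindB_append_last (d : Int) (xs : List Int) :
    pvFindB (xs ++ [d]) =
      if d ≠ 9 then some (xs ++ [d + 1])
      else (pvFindB xs).map (fun r => r ++ [0]) := by
  induction xs with
  | nil => simp [pvFindB]
  | cons x t ih =>
    by_cases hd : d = 9
    · simp only [hd, ne_eq, not_true_eq_false, if_false] at ih ⊢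
      simp only [List.cons_append, pvFindB, ih]
      cases pvFindB t with
      | none =>
        simp only [Option.map_none]
        by_cases hx : x = 9 <;> simp [hx, List.map_append]
      | some r => simp
    · simp only [ne_eq, hd, not_false_eq_true, if_true] at ih ⊢
      simp [List.cons_append, pvFindB, ih]

theorem pvLoop_eq_find (r : List Int) :
    (pvLoopA r).reverse = (pvFindB r.reverse).getD (1 :: r.reverse.map (fun _ => 0)) := by
  induction r with
  | nil => simp [pvLoopA, pvFindB]
  | cons d rest ih =>
    simp only [List.reverse_cons, pvFindB_append_last]
    by_cases hd : d = 9
    · simp only [hd, ne_eq, not_true_eq_false, if_false, pvLoopA, if_true, List.reverse_cons]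
      rw [ih]
      cases pvFindB rest.reverse with
      | none => simp [List.map_append]
      | some v => simp
    · simp [pvLoopA, hd]

-- ===== VERDICT (by name: the statement is the Claim_ definition above) =====
theorem iteration_plus_one_spec : Claim_equal_iteration_plus_one := by
  intro digits _
  unfold Spec_iteration_plus_one iteration_plus_one iteration_plus_one_alt
  simpa using pvLoop_eq_find digits.reverse
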